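-- pv_equiv track=rewrite | github.com/tarunama/AtCoder | ABC/051/B.py | solve
-- ===== SOURCE A (Python) =====
-- def solve(k, s):
--     count = 0
--     for i in range(k + 1):
--         for j in range(k + 1):
--             z = s - i - j
--             if 0 <= z and z <= k:
--                 count += 1
--     return count
-- ===== SOURCE B (Python) =====
-- def solve(k, s):
--     count = 0
--     for i in range(k + 1):
--         lo = max(0, s - i - k)
--         hi = min(k, s - i)
--         if lo <= hi:
--             count += hi - lo + 1
--     return count
-- ===== Notes on version B (the rewrite author's own statement) =====
-- stated objective: faster
-- what changed: Replaced the inner loop over j by an O(1) interval-intersection count per i (hi - lo + 1), turning O(k^2) into O(k).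
import Mathlib
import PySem

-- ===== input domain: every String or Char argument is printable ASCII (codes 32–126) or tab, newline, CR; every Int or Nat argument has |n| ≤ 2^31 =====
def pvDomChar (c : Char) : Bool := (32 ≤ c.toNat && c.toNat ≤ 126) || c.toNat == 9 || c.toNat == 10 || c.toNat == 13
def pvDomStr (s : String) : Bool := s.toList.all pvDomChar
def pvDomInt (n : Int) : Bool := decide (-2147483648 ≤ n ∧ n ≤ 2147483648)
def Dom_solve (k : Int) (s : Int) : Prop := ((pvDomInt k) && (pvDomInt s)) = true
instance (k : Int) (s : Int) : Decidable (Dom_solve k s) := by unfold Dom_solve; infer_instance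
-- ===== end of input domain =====

-- B replaces A's inner j-loop by an O(1) interval-intersection count per i: O(k) instead of O(k^2).


-- ===== PORT A =====
def solve (k : Int) (s : Int) : Int :=
  (PySem.List.pyRange 0 (k + 1) 1).foldl (fun count i =>
    (PySem.List.pyRange 0 (k + 1) 1).foldl (fun count j =>
      let z := s - i - j
      if 0 ≤ z ∧ z ≤ k then count + 1 else count) count) 0

-- ===== PORT B =====
def solve_alt (k : Int) (s : Int) : Int :=
  (PySem.List.pyRange 0 (k + 1) 1).foldl (fun count i =>
    let lo := max 0 (s - i - k)
    let hi := min k (s - i)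
    if lo ≤ hi then count + (hi - lo + 1) else count) 0

-- ===== PRECONDITION & SPEC =====
def Spec_solve (k : Int) (s : Int) (out : Int) : Prop := out = solve_alt k s
instance (k : Int) (s : Int) (out : Int) : Decidable (Spec_solve k s out) := by unfold Spec_solve; infer_instance

-- ===== CLAIM (what is proved, stated in full; the proofs are below) =====
def Claim_equal_solve : Prop := ∀ (k : Int) (s : Int), Dom_solve k s → Spec_solve k s (solve k s)

-- ===== LEMMAS AND PROOFS =====

-- A's inner j-loop over range(m) counts exactly the intersection interval.
theorem inner_count (t kk : Int) (m : Nat) (c : Int) :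
    (PySem.List.pyRange 0 (m : Int) 1).foldl (fun count j =>
        if 0 ≤ t - j ∧ t - j ≤ kk then count + 1 else count) c
    = c + (if max 0 (t - kk) ≤ min ((m : Int) - 1) t
           then min ((m : Int) - 1) t - max 0 (t - kk) + 1 else 0) := by
  induction m generalizing c with
  | zero =>
      simp [PySem.List.pyRange_one_eq_nil]
  | succ n ih =>
      have h : ((n : Int) + 1) = ((n + 1 : Nat) : Int) := by push_cast; ring
      rw [← h, PySem.List.pyRange_one_succ_right (by positivity), List.foldl_append, ih]
      simp only [List.foldl_cons, List.foldl_nil]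
      split_ifs <;> omega

theorem foldl_ptwise (l : List Int) (f g : Int → Int → Int)
    (h : ∀ c x, f c x = g c x) (c : Int) : l.foldl f c = l.foldl g c := by
  induction l generalizing c with
  | nil => rfl
  | cons a l ih => simp [List.foldl_cons, h]; exact ih _

theorem solve_spec : Claim_equal_solve := by
  intro k s _
  unfold Spec_solve solve solve_alt
  by_cases hk : k + 1 ≤ 0
  · rw [PySem.List.pyRange_one_eq_nil (by omega)]; rfl
  · rw [not_le] at hk
    apply foldl_ptwise
    intro c i
    have hm : (k + 1) = (((k + 1).toNat : Nat) : Int) := by omega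
    rw [hm, inner_count (s - i) k ((k + 1).toNat) c]
    have : (((k + 1).toNat : Nat) : Int) - 1 = k := by omega
    rw [this]
    dsimp only
    split_ifs <;> omega
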